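-- pv_equiv track=rewrite | github.com/pabgarcialopez/Math-thesis | src/tm/utils.py | get_projected_history_function
-- ===== SOURCE A (Python) =====
-- def get_projected_history_function(config_history, projection):
--     """
--     Returns the projected history function of a Turing Machine's conf_history, by building
--     a list of length `2^(len(projection))`, where each position is indexed by
--     the integer value of the projected configuration bits. Each position is set
--     to 1 if that projected pattern was seen during the execution of the Turing Machine,
--     or 0 otherwise.
--     """
--
--     domain_size = 2 ** len(projection)
--     projected_history_func = [0] * domain_size
--
--     for config in config_history:
--         projected_config = "".join(config[index] for index in projection)
--         idx = int(projected_config, 2)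
--         projected_history_func[idx] = 1
--
--     projected_history_func.reverse()
--     return projected_history_func
-- ===== SOURCE B (Python) =====
-- def get_projected_history_function(config_history, projection):
--     # distinct projected values, sorted descending
--     vals = sorted({int("".join(config[i] for i in projection), 2)
--                    for config in config_history}, reverse=True)
--     # merge scan: walk the output coordinate v downwards alongside the sorted list
--     out = []
--     k = 0
--     for v in range(2 ** len(projection) - 1, -1, -1):
--         if k < len(vals) and vals[k] == v:
--             out.append(1)
--             k += 1
--         else:
--             out.append(0)
--     return out
-- ===== Notes on version B (the rewrite author's own statement) =====
-- stated objective: alternative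
-- what changed: Instead of scatter-marking a preallocated array and reversing it, B collects the distinct projected values, sorts them descending, and emits the indicator list by a single merge scan of the descending output coordinate against the sorted list with an advancing pointer.
import Mathlib
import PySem

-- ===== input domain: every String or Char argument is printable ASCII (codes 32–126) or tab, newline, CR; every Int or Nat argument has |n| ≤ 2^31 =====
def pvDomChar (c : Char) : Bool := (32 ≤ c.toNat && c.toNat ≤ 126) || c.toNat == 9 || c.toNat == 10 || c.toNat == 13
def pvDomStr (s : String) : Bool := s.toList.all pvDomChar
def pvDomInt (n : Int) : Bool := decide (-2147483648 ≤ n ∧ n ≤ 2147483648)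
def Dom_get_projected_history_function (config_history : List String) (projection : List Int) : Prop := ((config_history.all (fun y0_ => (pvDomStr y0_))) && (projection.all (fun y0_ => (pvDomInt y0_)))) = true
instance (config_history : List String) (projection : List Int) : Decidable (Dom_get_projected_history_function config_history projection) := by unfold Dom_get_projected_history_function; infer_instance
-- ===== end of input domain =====

-- B replaces A's scatter-marking of a preallocated array + reverse() by sorting the distinct
-- projected values descending and emitting the indicator list via a single merge scan; alternative
-- algorithm, similar cost.


-- ===== PORT A =====
-- shared helper: int("".join(config[i] for i in projection), 2).
-- Exact under Pre_ (all indexed chars exist and are '0'/'1'); outside Pre_ Python raises and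
-- this total form returns a junk value (missing char ↦ '0', non-'1' char counts as 0).
def pvProjIdx (config : String) (projection : List Int) : Nat :=
  (projection.map (fun i => (PySem.Str.pyGet? config i).getD '0')).foldl
    (fun a c => 2 * a + (if c = '1' then 1 else 0)) 0

def get_projected_history_function (config_history : List String) (projection : List Int) : List Int :=
  let domain_size := 2 ^ projection.length
  let projected_history_func := List.replicate domain_size (0 : Int)
  let projected_history_func := config_history.foldl
    (fun arr config => arr.set (pvProjIdx config projection) 1) projected_history_func
  projected_history_func.reverse

-- ===== PORT B =====
-- the merge-scan loop of Source B: 'for v in range(D-1,-1,-1)' becomes a countdown recursion;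
-- python's 'k < len(vals) and vals[k] == v' is exactly 'vals[k]? = some v'
def pvScan (vals : List Nat) : Nat → Nat → List Int
  | 0, _ => []
  | v + 1, k =>
    if vals[k]? = some v then 1 :: pvScan vals v (k + 1) else 0 :: pvScan vals v k

def get_projected_history_function_alt (config_history : List String) (projection : List Int) : List Int :=
  let vals := PySem.List.sorted
    (config_history.foldl (fun s config => PySem.Set.add s (pvProjIdx config projection))
      PySem.Set.empty)
    (fun x => x) true
  pvScan vals (2 ^ projection.length) 0

-- ===== PRECONDITION & SPEC =====
-- Pre_ excludes exactly the inputs where Python A raises: an out-of-range or non-binary character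
-- at some projected position (IndexError / ValueError), or an empty projection with a nonempty
-- history (int('', 2) raises ValueError).
def Pre_get_projected_history_function (config_history : List String) (projection : List Int) : Prop :=
  config_history = [] ∨
    (projection ≠ [] ∧ ∀ c ∈ config_history, ∀ i ∈ projection,
      PySem.Str.pyGet? c i = some '0' ∨ PySem.Str.pyGet? c i = some '1')
instance (config_history : List String) (projection : List Int) : Decidable (Pre_get_projected_history_function config_history projection) := by unfold Pre_get_projected_history_function; infer_instance

def pvWitness_get_projected_history_function : List String × List Int := (["01", "11"], [0, 1])

def Spec_get_projected_history_function (config_history : List String) (projection : List Int) (out : List Int) : Prop := out = get_projected_history_function_alt config_history projection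
instance (config_history : List String) (projection : List Int) (out : List Int) : Decidable (Spec_get_projected_history_function config_history projection out) := by unfold Spec_get_projected_history_function; infer_instance

-- ===== CLAIM (what is proved, stated in full; the proofs are below) =====
def Claim_equal_get_projected_history_function : Prop := ∀ (config_history : List String) (projection : List Int), Dom_get_projected_history_function config_history projection → Pre_get_projected_history_function config_history projection → Spec_get_projected_history_function config_history projection (get_projected_history_function config_history projection)

-- ===== LEMMAS AND PROOFS =====

-- the projected index is always below the domain size (each step adds a bit 0/1)
lemma pvBinVal_lt (l : List Char) (a : Nat) :
    l.foldl (fun a c => 2 * a + (if c = '1' then 1 else 0)) a < (a + 1) * 2 ^ l.length := by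
  induction l generalizing a with
  | nil => simp
  | cons c l ih =>
    have h := ih (2 * a + (if c = '1' then 1 else 0))
    have hb : (if c = '1' then 1 else 0) ≤ 1 := by split <;> omega
    calc l.foldl (fun a c => 2 * a + (if c = '1' then 1 else 0))
            (2 * a + (if c = '1' then 1 else 0))
        < (2 * a + (if c = '1' then 1 else 0) + 1) * 2 ^ l.length := h
      _ ≤ (a + 1) * 2 ^ (c :: l).length := by
          simp only [List.length_cons, pow_succ]
          nlinarith [Nat.two_pow_pos l.length]

lemma pvProjIdx_lt (config : String) (projection : List Int) :
    pvProjIdx config projection < 2 ^ projection.length := by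
  have h := pvBinVal_lt (projection.map (fun i => (PySem.Str.pyGet? config i).getD '0')) 0
  simpa [pvProjIdx] using h

lemma pv_fold_set_length (projection : List Int) (h : List String) (arr : List Int) :
    (h.foldl (fun arr config => arr.set (pvProjIdx config projection) 1) arr).length
      = arr.length := by
  induction h generalizing arr with
  | nil => rfl
  | cons c h ih => simp [List.foldl_cons, ih (arr.set (pvProjIdx c projection) 1)]

-- the marker array after A's loop: position j holds 1 iff some config projects to j
lemma pv_fold_set_get (projection : List Int) (h : List String) (arr : List Int) (j : Nat)
    (hlen : ∀ c, pvProjIdx c projection < arr.length) :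
    (h.foldl (fun arr config => arr.set (pvProjIdx config projection) 1) arr)[j]?
      = if ∃ c ∈ h, pvProjIdx c projection = j then some 1 else arr[j]? := by
  induction h generalizing arr with
  | nil => simp
  | cons c h ih =>
    have hlen' : ∀ c', pvProjIdx c' projection < (arr.set (pvProjIdx c projection) 1).length := by
      simpa using hlen
    rw [List.foldl_cons, ih _ hlen']
    by_cases hmem : ∃ c' ∈ h, pvProjIdx c' projection = j
    · simp [hmem]
    · by_cases hc : pvProjIdx c projection = j
      · subst hc
        simp [hmem, hlen c]
      · simp [hmem, hc]

-- B's 'seen' set collects exactly the projected indices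
lemma pv_fold_seen_mem (projection : List Int) (h : List String) (s : PySem.Set Nat) (j : Nat) :
    (j ∈ h.foldl (fun s config => PySem.Set.add s (pvProjIdx config projection)) s)
      ↔ j ∈ s ∨ ∃ c ∈ h, pvProjIdx c projection = j := by
  induction h generalizing s with
  | nil => simp
  | cons c h ih =>
    rw [List.foldl_cons, ih]
    simp [PySem.Set.mem_add]
    tauto

lemma pv_fold_seen_nodup (projection : List Int) (h : List String) (s : PySem.Set Nat)
    (hs : s.Nodup) :
    (h.foldl (fun s config => PySem.Set.add s (pvProjIdx config projection)) s).Nodup := by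
  induction h generalizing s with
  | nil => exact hs
  | cons c h ih => exact ih _ (PySem.Set.nodup_add s (pvProjIdx c projection) hs)

-- the merge scan on a strictly descending list whose remaining suffix lies below v
-- produces the membership indicator of the descending range, elementwise
lemma pvScan_get (vals : List Nat) (hs : vals.Pairwise (· > ·)) :
    ∀ (v k j : Nat), (∀ x ∈ vals.drop k, x < v) →
    (pvScan vals v k)[j]?
      = if j < v then some (if v - 1 - j ∈ vals.drop k then (1 : Int) else 0) else none := by
  intro v
  induction v with
  | zero => intro k j _; simp [pvScan]
  | succ v ih =>
    intro k j hlt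
    by_cases hk : vals[k]? = some v
    · obtain ⟨hklen, hv⟩ := List.getElem?_eq_some_iff.mp hk
      have hdrop : vals.drop k = v :: vals.drop (k + 1) := by
        rw [← List.getElem_cons_drop hklen, hv]
      have hstail : (vals.drop k).Pairwise (· > ·) := hs.drop
      have hlt' : ∀ x ∈ vals.drop (k + 1), x < v := by
        intro x hx
        rw [hdrop] at hstail
        exact (List.pairwise_cons.mp hstail).1 x hx
      have hstep : pvScan vals (v + 1) k = 1 :: pvScan vals v (k + 1) := by
        simp [pvScan, hk]
      cases j with
      | zero =>
        rw [hstep, hdrop]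
        simp
      | succ j =>
        rw [hstep, List.getElem?_cons_succ, ih (k + 1) j hlt']
        have h2 : v + 1 - 1 - (j + 1) = v - 1 - j := by omega
        rw [h2, hdrop]
        by_cases hj : j < v
        · have h3 : v - 1 - j ≠ v := by omega
          simp [hj, show j + 1 < v + 1 from by omega, h3]
        · simp [hj, show ¬ (j + 1 < v + 1) from by omega]
    · have hnot : v ∉ vals.drop k := by
        intro hmem
        have hne : vals.drop k ≠ [] := by intro h; rw [h] at hmem; simp at hmem
        have hklen : k < vals.length := by
          by_contra h
          exact hne (List.drop_eq_nil_of_le (by omega))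
        have hdrop : vals.drop k = vals[k] :: vals.drop (k + 1) :=
          (List.getElem_cons_drop hklen).symm
        have hstail : (vals.drop k).Pairwise (· > ·) := hs.drop
        rw [hdrop] at hstail hmem
        rcases List.mem_cons.mp hmem with hm | hm
        · exact hk (by rw [List.getElem?_eq_getElem hklen, hm])
        · have h1 : vals[k] > v := (List.pairwise_cons.mp hstail).1 v hm
          have h2 : vals[k] < v + 1 := hlt _ (by rw [hdrop]; exact List.mem_cons_self ..)
          omega
      have hlt' : ∀ x ∈ vals.drop k, x < v := by
        intro x hx
        have h1 := hlt x hx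
        have h2 : x ≠ v := fun h => hnot (h ▸ hx)
        omega
      have hstep : pvScan vals (v + 1) k = 0 :: pvScan vals v k := by
        simp [pvScan, hk]
      cases j with
      | zero =>
        rw [hstep]
        simp [hnot]
      | succ j =>
        rw [hstep, List.getElem?_cons_succ, ih k j hlt']
        have h2 : v + 1 - 1 - (j + 1) = v - 1 - j := by omega
        rw [h2]
        by_cases hj : j < v
        · simp [hj, show j + 1 < v + 1 from by omega]
        · simp [hj, show ¬ (j + 1 < v + 1) from by omega]

-- ===== VERDICT (by name: the statement is the Claim_ definition above) =====
theorem get_projected_history_function_spec : Claim_equal_get_projected_history_function := by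
  intro config_history projection _ _
  unfold Spec_get_projected_history_function
  unfold get_projected_history_function get_projected_history_function_alt
  simp only []
  set D := 2 ^ projection.length with hD
  set seen := config_history.foldl
    (fun s config => PySem.Set.add s (pvProjIdx config projection)) PySem.Set.empty with hseen
  set vals := PySem.List.sorted seen (fun x => x) true with hvals
  have hseen_nodup : seen.Nodup :=
    pv_fold_seen_nodup projection config_history PySem.Set.empty List.nodup_nil
  have hperm : vals.Perm seen := PySem.List.sorted_perm ..
  have hvals_nodup : vals.Nodup := hperm.nodup_iff.mpr hseen_nodup
  have hpw : vals.Pairwise (fun a b => b ≤ a) := by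
    have := PySem.List.sorted_pairwise_rev (xs := seen) (key := fun x : Nat => x)
    simpa [hvals] using this
  have hsorted : vals.Pairwise (· > ·) :=
    (hpw.and hvals_nodup).imp (fun h => by omega)
  have hmem_vals : ∀ j, j ∈ vals ↔ ∃ c ∈ config_history, pvProjIdx c projection = j := by
    intro j
    rw [hperm.mem_iff, hseen, pv_fold_seen_mem]
    simp [PySem.Set.empty]
  have hlt : ∀ x ∈ vals.drop 0, x < D := by
    intro x hx
    simp only [List.drop_zero] at hx
    obtain ⟨c, _, hc⟩ := (hmem_vals x).mp hx
    rw [← hc]; exact pvProjIdx_lt c projection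
  have hlen0 : ∀ c, pvProjIdx c projection < (List.replicate D (0 : Int)).length := by
    intro c; simpa using pvProjIdx_lt c projection
  have hflen : (config_history.foldl
      (fun arr config => arr.set (pvProjIdx config projection) 1)
      (List.replicate D (0 : Int))).length = D := by
    simpa using pv_fold_set_length projection config_history (List.replicate D 0)
  apply List.ext_getElem?
  intro i
  rw [pvScan_get vals hsorted D 0 i hlt]
  simp only [List.drop_zero]
  by_cases hi : i < D
  · rw [List.getElem?_reverse (by omega : i < _)]
    rw [hflen]
    rw [pv_fold_set_get projection config_history _ _ hlen0]
    by_cases hx : D - 1 - i ∈ vals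
    · obtain hex := (hmem_vals (D - 1 - i)).mp hx
      simp [hex, hx, hi]
    · have hex : ¬ ∃ c ∈ config_history, pvProjIdx c projection = D - 1 - i :=
        fun h => hx ((hmem_vals _).mpr h)
      simp [hex, hx, hi, show D - 1 - i < D by omega]
  · have h1 : (config_history.foldl
        (fun arr config => arr.set (pvProjIdx config projection) 1)
        (List.replicate D (0 : Int))).reverse.length ≤ i := by
      rw [List.length_reverse, hflen]; omega
    rw [List.getElem?_eq_none h1]
    simp [hi]
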